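-- pv_equiv track=rewrite | github.com/potomatoo/TIL | Programmers/kakao_입국심사.py | solution
-- ===== SOURCE A (Python) =====
-- def solution(n, times):
--     answer = 0
--     start = 1
--     end = max(times) * n
--     while start <= end:
--         mid = (start+end) // 2
--         pass_people = 0
--         for time in times:
--             one = mid // time
--             pass_people += one
--         if pass_people >= n:
--             answer = mid
--             end = mid - 1
--
--         if pass_people < n:
--             start = mid + 1
--
--     return answer
-- ===== SOURCE B (Python) =====
-- def solution(n, times):
--     if n <= 0:
--         return 0
--     # The answer is the least T with sum(T // t) >= n.  Bound it in a harmonic window: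
--     # with D = product(times) and S = sum(D // t), n*D/S <= answer <= (n+k)*D/S, and the
--     # answer is a multiple of some gate time, so only ~2k candidates need checking.
--     D = 1
--     for t in times:
--         D *= t
--     S = 0
--     for t in times:
--         S += D // t
--     k = len(times)
--     lo = -((-(n * D)) // S)          # ceil(n*D/S)
--     if lo < 1:
--         lo = 1
--     hi = -((-((n + k) * D)) // S)    # ceil((n+k)*D/S)
--     best = hi + 1
--     for t in times:
--         for m in range(-((-lo) // t), hi // t + 1):   # multiples of t inside [lo, hi]
--             c = m * t
--             if c < best:
--                 people = 0
--                 for u in times: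
--                     people += c // u
--                 if people >= n:
--                     best = c
--     return best
-- ===== Notes on version B (the rewrite author's own statement) =====
-- stated objective: alternative
-- what changed: Binary search over the total time replaced by a harmonic-window candidate scan: with D = product(times) and S = sum(D//t), the answer lies in [ceil(n*D/S), ceil((n+k)*D/S)] and is a multiple of some gate time, so B checks only the ~2k multiples of each gate time inside that window and returns the least one that processes at least n people.
-- outside the precondition, e.g. on solution(2, [-2, 3]): A returns 0, B returns -24; on solution(-2, [-3]): A returns 1, B returns 0
import Mathlib
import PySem

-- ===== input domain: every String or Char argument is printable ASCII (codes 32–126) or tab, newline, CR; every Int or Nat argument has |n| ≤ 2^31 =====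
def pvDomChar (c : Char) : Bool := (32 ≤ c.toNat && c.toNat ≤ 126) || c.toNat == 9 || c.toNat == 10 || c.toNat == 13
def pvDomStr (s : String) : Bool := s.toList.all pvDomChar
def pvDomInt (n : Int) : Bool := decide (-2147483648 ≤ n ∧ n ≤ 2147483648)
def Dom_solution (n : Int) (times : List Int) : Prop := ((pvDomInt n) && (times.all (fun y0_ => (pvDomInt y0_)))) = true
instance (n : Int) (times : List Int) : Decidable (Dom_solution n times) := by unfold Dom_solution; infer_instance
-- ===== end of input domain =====

-- B replaces A's binary search over the total time by a harmonic-window candidate scan: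
-- the answer is bracketed between ceil(n*D/S) and ceil((n+k)*D/S) (D = product of times,
-- S = sum of D/t) and must be a multiple of some gate time, so only the multiples of each
-- gate time inside that window are checked; alternative algorithm, not claimed faster.

-- ===== PORT A =====
-- pass_people accumulation loop of A
def pvPass (mid : Int) (times : List Int) : Int :=
  times.foldl (fun acc t => acc + PySem.Int.floordiv mid t) 0

-- A's while loop (state: answer, start, end)
def pvAloop (n : Int) (times : List Int) (answer start e : Int) : Int :=
  if h : start ≤ e then
    let mid := PySem.Int.floordiv (start + e) 2
    if n ≤ pvPass mid times then
      pvAloop n times mid start (mid - 1)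
    else
      pvAloop n times answer (mid + 1) e
  else answer
termination_by (e + 1 - start).toNat
decreasing_by
  · have hb := PySem.Int.floordiv_two_mid_bounds h
    omega
  · have hb := PySem.Int.floordiv_two_mid_bounds h
    omega

def solution (n : Int) (times : List Int) : Int :=
  match PySem.List.max? times (fun y => y) with
  | none => 0          -- Python raises ValueError on empty times; excluded by Pre_
  | some mx => pvAloop n times 0 1 (mx * n)

-- ===== PORT B =====
-- people accumulation loop of B (for u in times: people += c // u)
def pvPeople (c : Int) (times : List Int) : Int :=
  times.foldl (fun acc u => acc + PySem.Int.floordiv c u) 0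

-- D *= t loop
def pvProd (times : List Int) : Int :=
  times.foldl (fun a t => a * t) 1

-- S += D // t loop
def pvSsum (D : Int) (times : List Int) : Int :=
  times.foldl (fun a t => a + PySem.Int.floordiv D t) 0

-- inner loop: for m in range(-((-lo)//t), hi//t + 1): c = m*t; if c < best and people >= n: best = c
def pvScanT (n lo hi : Int) (times : List Int) (best t : Int) : Int :=
  (PySem.List.pyRange (-(PySem.Int.floordiv (-lo) t)) (PySem.Int.floordiv hi t + 1) 1).foldl
    (fun best m =>
      if m * t < best then
        if n ≤ pvPeople (m * t) times then m * t else best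
      else best) best

def solution_alt (n : Int) (times : List Int) : Int :=
  if n ≤ 0 then 0
  else
    let D := pvProd times
    let S := pvSsum D times
    let lo0 := -(PySem.Int.floordiv (-(n * D)) S)
    let lo := if lo0 < 1 then 1 else lo0
    let hi := -(PySem.Int.floordiv (-((n + (times.length : Int)) * D)) S)
    times.foldl (pvScanT n lo hi times) (hi + 1)

-- ===== PRECONDITION & SPEC =====
-- Pre_ excludes empty times (Python's max raises ValueError) and, when the binary search actually
-- runs (n > 0, or n < 0 with all entries non-positive), lists with entries below 1, which are outside
-- the natural domain of processing times: a 0 entry raises ZeroDivisionError and on negative entries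
-- A's value is a floor-division artefact of the binary search.
def Pre_solution (n : Int) (times : List Int) : Prop :=
  times ≠ [] ∧ (0 < n → ∀ t ∈ times, 1 ≤ t) ∧ (n < 0 → ∃ t ∈ times, 1 ≤ t)
instance (n : Int) (times : List Int) : Decidable (Pre_solution n times) := by
  unfold Pre_solution; infer_instance

def pvWitness_solution : Int × List Int := (6, [7, 10])

def Spec_solution (n : Int) (times : List Int) (out : Int) : Prop := out = solution_alt n times
instance (n : Int) (times : List Int) (out : Int) : Decidable (Spec_solution n times out) := by
  unfold Spec_solution; infer_instance

-- ===== CLAIM (what is proved, stated in full; the proofs are below) =====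
def Claim_equal_solution : Prop := ∀ (n : Int) (times : List Int), Dom_solution n times → Pre_solution n times → Spec_solution n times (solution n times)

-- ===== LEMMAS AND PROOFS =====

-- total processed people by time T (with exact division /, valid since all t ≥ 1)
def fsum (ts : List Int) (T : Int) : Int := (ts.map (fun t => T / t)).sum

lemma pvPass_eq_fsum (ts : List Int) (T : Int) (ht : ∀ t ∈ ts, 1 ≤ t) :
    pvPass T ts = fsum ts T := by
  unfold pvPass fsum
  rw [PySem.List.foldl_add (g := fun t => PySem.Int.floordiv T t)]
  rw [List.map_congr_left (fun t htm => PySem.Int.floordiv_eq_ediv_of_pos (by have := ht t htm; omega))]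
  omega

lemma pvPeople_eq_fsum (ts : List Int) (T : Int) (ht : ∀ t ∈ ts, 1 ≤ t) :
    pvPeople T ts = fsum ts T := by
  unfold pvPeople fsum
  rw [PySem.List.foldl_add (g := fun t => PySem.Int.floordiv T t)]
  rw [List.map_congr_left (fun t htm => PySem.Int.floordiv_eq_ediv_of_pos (by have := ht t htm; omega))]
  omega

lemma fsum_mono (ts : List Int) (ht : ∀ t ∈ ts, 1 ≤ t) {T T' : Int} (h : T ≤ T') :
    fsum ts T ≤ fsum ts T' := by
  induction ts with
  | nil => simp [fsum]
  | cons a l ih =>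
    have ha := ht a (by simp)
    have h1 : T / a ≤ T' / a := Int.ediv_le_ediv (by omega) h
    have h2 := ih (fun t htm => ht t (by simp [htm]))
    simp only [fsum, List.map_cons, List.sum_cons] at *
    omega

lemma fsum_nonneg (ts : List Int) (ht : ∀ t ∈ ts, 1 ≤ t) {T : Int} (hT : 0 ≤ T) :
    0 ≤ fsum ts T := by
  induction ts with
  | nil => simp [fsum]
  | cons a l ih =>
    have ha := ht a (by simp)
    have h1 : 0 ≤ T / a := Int.ediv_nonneg hT (by omega)
    have h2 := ih (fun t htm => ht t (by simp [htm]))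
    simp only [fsum, List.map_cons, List.sum_cons] at *
    omega

lemma fsum_nonpos (ts : List Int) (ht : ∀ t ∈ ts, 1 ≤ t) {T : Int} (hT : T ≤ 0) :
    fsum ts T ≤ 0 := by
  induction ts with
  | nil => simp [fsum]
  | cons a l ih =>
    have ha := ht a (by simp)
    have h1 : T / a < 1 := (Int.ediv_lt_iff_lt_mul (by omega)).2 (by omega)
    have h2 := ih (fun t htm => ht t (by simp [htm]))
    simp only [fsum, List.map_cons, List.sum_cons] at *
    omega

-- the maximal gate alone processes n people by time mx * n
lemma fsum_max (ts : List Int) (ht : ∀ t ∈ ts, 1 ≤ t) (mx n : Int)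
    (hmem : mx ∈ ts) (hmax : ∀ t ∈ ts, t ≤ mx) (hn : 1 ≤ n) :
    n ≤ fsum ts (mx * n) := by
  obtain ⟨l1, l2, rfl⟩ := List.append_of_mem hmem
  have hmx : 1 ≤ mx := ht mx hmem
  have hM : 0 ≤ mx * n := by positivity
  have h1 : 0 ≤ fsum l1 (mx * n) :=
    fsum_nonneg l1 (fun t htm => ht t (by simp [htm])) hM
  have h2 : 0 ≤ fsum l2 (mx * n) :=
    fsum_nonneg l2 (fun t htm => ht t (by simp [htm])) hM
  have h3 : mx * n / mx = n := Int.mul_ediv_cancel_left n (by omega)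
  simp only [fsum, List.map_append, List.map_cons, List.sum_append, List.sum_cons] at *
  omega

-- ===== A-side: the binary search returns the least T ≥ 1 with fsum ts T ≥ n =====

lemma aloop_spec (n : Int) (ts : List Int) (ht : ∀ t ∈ ts, 1 ≤ t) :
    ∀ (answer start e : Int),
    1 ≤ start → start ≤ e + 1 →
    (∀ T, 1 ≤ T → T < start → fsum ts T < n) →
    n ≤ fsum ts (e + 1) →
    (answer = e + 1 ∨ (answer = 0 ∧ n ≤ fsum ts e ∧ 1 ≤ e)) →
    n ≤ fsum ts (pvAloop n ts answer start e) ∧ 1 ≤ pvAloop n ts answer start e ∧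
      (∀ T, 1 ≤ T → T < pvAloop n ts answer start e → fsum ts T < n) := by
  intro answer start e
  induction answer, start, e using pvAloop.induct n ts with
  | case1 answer start e h mid hfound ih =>
    intro h1 h5 h2 h3 h4
    have hb : start ≤ mid ∧ mid ≤ e := PySem.Int.floordiv_two_mid_bounds h
    rw [pvPass_eq_fsum ts mid ht] at hfound
    rw [pvAloop]
    simp only [h, dite_true, ← pvPass_eq_fsum ts mid ht] at *
    rw [if_pos hfound]
    rw [pvPass_eq_fsum ts mid ht] at hfound
    apply ih (by omega) (by omega) h2
    · have : mid - 1 + 1 = mid := by omega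
      rw [this]; exact hfound
    · left; omega
  | case2 answer start e h mid hfound ih =>
    intro h1 h5 h2 h3 h4
    have hb : start ≤ mid ∧ mid ≤ e := PySem.Int.floordiv_two_mid_bounds h
    rw [pvPass_eq_fsum ts mid ht] at hfound
    rw [pvAloop]
    simp only [h, dite_true, ← pvPass_eq_fsum ts mid ht] at *
    rw [if_neg hfound]
    rw [pvPass_eq_fsum ts mid ht] at hfound
    push_neg at hfound
    apply ih (by omega) (by omega) _ h3 h4
    intro T hT1 hT2
    by_cases hc : T < start
    · exact h2 T hT1 hc
    · calc fsum ts T ≤ fsum ts mid := fsum_mono ts ht (by omega)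
        _ < n := hfound
  | case3 answer start e h =>
    intro h1 h5 h2 h3 h4
    rw [pvAloop, dif_neg h]
    have hse : start = e + 1 := by omega
    rcases h4 with h4 | ⟨h40, h4f, h4e⟩
    · refine ⟨by rw [h4]; exact h3, by omega, ?_⟩
      intro T hT1 hT2
      exact h2 T hT1 (by omega)
    · exfalso
      have := h2 e h4e (by omega)
      omega

-- ===== B-side: the candidate scan also returns the least T ≥ 1 with fsum ts T ≥ n =====

-- the running product is the list product, positive, and divisible by every element
lemma pvProd_eq (ts : List Int) : pvProd ts = ts.prod := by
  rw [List.prod_eq_foldl]; rfl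

lemma pvProd_pos (ts : List Int) (ht : ∀ t ∈ ts, 1 ≤ t) : 1 ≤ pvProd ts := by
  rw [pvProd_eq]
  induction ts with
  | nil => simp
  | cons a l ih =>
    have ha := ht a (by simp)
    have h2 := ih (fun t htm => ht t (by simp [htm]))
    rw [List.prod_cons]
    nlinarith

lemma pvProd_dvd (ts : List Int) {t : Int} (h : t ∈ ts) : t ∣ pvProd ts := by
  rw [pvProd_eq]; exact List.dvd_prod h

-- the S loop computes the sum of the exact quotients D / t
lemma pvSsum_eq (D : Int) (ts : List Int) (ht : ∀ t ∈ ts, 1 ≤ t) :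
    pvSsum D ts = (ts.map (fun t => D / t)).sum := by
  unfold pvSsum
  rw [PySem.List.foldl_add (g := fun t => PySem.Int.floordiv D t)]
  rw [List.map_congr_left (fun t htm => PySem.Int.floordiv_eq_ediv_of_pos (by have := ht t htm; omega))]
  omega

-- each exact quotient is ≥ 1, so S dominates the length
lemma Ssum_ge_length (ts : List Int) (D : Int) (hD : 1 ≤ D)
    (h : ∀ t ∈ ts, 1 ≤ t ∧ t ∣ D) :
    (ts.length : Int) ≤ (ts.map (fun t => D / t)).sum := by
  induction ts with
  | nil => simp
  | cons a l ih =>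
    obtain ⟨ha1, ha2⟩ := h a (by simp)
    have hle : a ≤ D := Int.le_of_dvd (by omega) ha2
    have h1 : 1 ≤ D / a := (Int.le_ediv_iff_mul_le (by omega)).2 (by omega)
    have h2 := ih (fun t htm => h t (by simp [htm]))
    simp only [List.map_cons, List.sum_cons, List.length_cons] at *
    push_cast
    omega

-- lower harmonic bound: fsum ts T * D ≤ T * Σ (D / t)
lemma fsum_mul_le (ts : List Int) (D : Int) (hD : 1 ≤ D)
    (h : ∀ t ∈ ts, 1 ≤ t ∧ t ∣ D) (T : Int) :
    fsum ts T * D ≤ T * (ts.map (fun t => D / t)).sum := by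
  induction ts with
  | nil => simp [fsum]
  | cons a l ih =>
    obtain ⟨ha1, ha2⟩ := h a (by simp)
    have hq : (T / a) * a ≤ T := (Int.le_ediv_iff_mul_le (by omega)).1 le_rfl
    have hqa : 0 ≤ D / a := Int.ediv_nonneg (by omega) (by omega)
    have hcancel : a * (D / a) = D := Int.mul_ediv_cancel' ha2
    have hstep : (T / a) * D ≤ T * (D / a) := by
      calc (T / a) * D = ((T / a) * a) * (D / a) := by rw [mul_assoc, hcancel]
        _ ≤ T * (D / a) := mul_le_mul_of_nonneg_right hq hqa
    have h2 := ih (fun t htm => h t (by simp [htm]))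
    simp only [fsum, List.map_cons, List.sum_cons] at *
    nlinarith [hstep, h2]

-- upper harmonic bound: T * Σ (D / t) ≤ (fsum ts T + length) * D
lemma fsum_mul_ge (ts : List Int) (D : Int) (hD : 1 ≤ D)
    (h : ∀ t ∈ ts, 1 ≤ t ∧ t ∣ D) (T : Int) :
    T * (ts.map (fun t => D / t)).sum ≤ (fsum ts T + (ts.length : Int)) * D := by
  induction ts with
  | nil => simp [fsum]
  | cons a l ih =>
    obtain ⟨ha1, ha2⟩ := h a (by simp)
    have hmod1 : 0 ≤ T % a := Int.emod_nonneg T (by omega)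
    have hmod2 : T % a < a := Int.emod_lt_of_pos T (by omega)
    have hdec : a * (T / a) + T % a = T := Int.mul_ediv_add_emod T a
    have hq : T ≤ (T / a + 1) * a := by nlinarith
    have hqa : 0 ≤ D / a := Int.ediv_nonneg (by omega) (by omega)
    have hcancel : a * (D / a) = D := Int.mul_ediv_cancel' ha2
    have hstep : T * (D / a) ≤ (T / a + 1) * D := by
      calc T * (D / a) ≤ ((T / a + 1) * a) * (D / a) := mul_le_mul_of_nonneg_right hq hqa
        _ = (T / a + 1) * D := by rw [mul_assoc, hcancel]
    have h2 := ih (fun t htm => h t (by simp [htm]))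
    simp only [fsum, List.map_cons, List.sum_cons, List.length_cons] at *
    push_cast at *
    nlinarith [hstep, h2]

-- ceiling division -((-a) // b): a ≤ q*b and q is least such
lemma ceil_spec (a b : Int) (hb : 0 < b) :
    a ≤ (-((-a) / b)) * b ∧ ∀ x, a ≤ x * b → -((-a) / b) ≤ x := by
  constructor
  · have h1 : ((-a) / b) * b ≤ -a := (Int.le_ediv_iff_mul_le hb).1 le_rfl
    nlinarith
  · intro x hx
    have h1 : -x ≤ (-a) / b := (Int.le_ediv_iff_mul_le hb).2 (by nlinarith)
    omega

-- if the floor quotient strictly increases from a-1 to a, then t divides a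
lemma dvd_of_ediv_lt (a t : Int) (ht : 1 ≤ t) (h : (a - 1) / t < a / t) : t ∣ a := by
  by_contra hc
  have hr0 : 0 ≤ a % t := Int.emod_nonneg a (by omega)
  have hr1 : a % t < t := Int.emod_lt_of_pos a (by omega)
  have hdec : t * (a / t) + a % t = a := Int.mul_ediv_add_emod a t
  have hrne : a % t ≠ 0 := fun h0 => hc (Int.dvd_of_emod_eq_zero h0)
  -- a - 1 = t * (a / t) + (a % t - 1) with 0 ≤ a % t - 1 < t, so (a-1)/t = a/t
  have hcm : a / t * t = t * (a / t) := mul_comm _ _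
  have h2 : (a / t) ≤ (a - 1) / t := (Int.le_ediv_iff_mul_le (by omega)).2 (by omega)
  omega

-- a strict increase of the total count pinpoints a gate whose own count increased
lemma exists_lt_of_fsum_lt (ts : List Int) (T : Int) (h : fsum ts (T - 1) < fsum ts T) :
    ∃ t ∈ ts, (T - 1) / t < T / t := by
  by_contra hc
  push_neg at hc
  have := List.sum_le_sum (l := ts) (f := fun t => T / t) (g := fun t => (T - 1) / t)
    (fun t htm => hc t htm)
  unfold fsum at h
  omega

-- the inner m-loop: never increases best, only moves to a qualifying multiple of t,
-- and ends below every qualifying multiple it scanned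
lemma scan_inner (n t : Int) (times : List Int) (ht : ∀ u ∈ times, 1 ≤ u) :
    ∀ (L : List Int) (best : Int),
    L.foldl (fun best m =>
      if m * t < best then
        if n ≤ pvPeople (m * t) times then m * t else best
      else best) best ≤ best ∧
    (L.foldl (fun best m =>
      if m * t < best then
        if n ≤ pvPeople (m * t) times then m * t else best
      else best) best = best ∨
      ∃ m ∈ L, L.foldl (fun best m =>
        if m * t < best then
          if n ≤ pvPeople (m * t) times then m * t else best
        else best) best = m * t ∧ n ≤ fsum times (m * t)) ∧
    (∀ m ∈ L, n ≤ fsum times (m * t) →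
      L.foldl (fun best m =>
        if m * t < best then
          if n ≤ pvPeople (m * t) times then m * t else best
        else best) best ≤ m * t) := by
  intro L
  induction L with
  | nil => intro best; refine ⟨le_rfl, Or.inl rfl, ?_⟩; intro m hm; simp at hm
  | cons m0 L ih =>
    intro best
    simp only [List.foldl_cons]
    by_cases h1 : m0 * t < best
    · by_cases h2 : n ≤ pvPeople (m0 * t) times
      · rw [if_pos h1, if_pos h2]
        obtain ⟨i1, i2, i3⟩ := ih (m0 * t)
        rw [pvPeople_eq_fsum times (m0 * t) ht] at h2
        refine ⟨by omega, ?_, ?_⟩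
        · rcases i2 with h | ⟨m, hm, hme, hmf⟩
          · exact Or.inr ⟨m0, by simp, h, h2⟩
          · exact Or.inr ⟨m, by simp [hm], hme, hmf⟩
        · intro m hm hmf
          rcases List.mem_cons.1 hm with rfl | hm'
          · exact i1
          · exact i3 m hm' hmf
      · rw [if_pos h1, if_neg h2]
        obtain ⟨i1, i2, i3⟩ := ih best
        rw [pvPeople_eq_fsum times (m0 * t) ht] at h2
        refine ⟨i1, ?_, ?_⟩
        · rcases i2 with h | ⟨m, hm, hme, hmf⟩
          · exact Or.inl h
          · exact Or.inr ⟨m, by simp [hm], hme, hmf⟩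
        intro m hm hmf
        rcases List.mem_cons.1 hm with rfl | hm'
        · exact absurd hmf h2
        · exact i3 m hm' hmf
    · rw [if_neg h1]
      obtain ⟨i1, i2, i3⟩ := ih best
      refine ⟨i1, ?_, ?_⟩
      · rcases i2 with h | ⟨m, hm, hme, hmf⟩
        · exact Or.inl h
        · exact Or.inr ⟨m, by simp [hm], hme, hmf⟩
      intro m hm hmf
      rcases List.mem_cons.1 hm with rfl | hm'
      · omega
      · exact i3 m hm' hmf

-- the outer loop over gate times: the final best is either the initial one or a
-- qualifying value ≥ lo, and it is ≤ every qualifying multiple inside the window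
lemma scan_outer (n lo hi : Int) (times : List Int) (htimes : ∀ u ∈ times, 1 ≤ u) :
    ∀ (ts' : List Int) (best : Int), (∀ t ∈ ts', 1 ≤ t) →
    ts'.foldl (pvScanT n lo hi times) best ≤ best ∧
    (ts'.foldl (pvScanT n lo hi times) best = best ∨
      (n ≤ fsum times (ts'.foldl (pvScanT n lo hi times) best) ∧
        lo ≤ ts'.foldl (pvScanT n lo hi times) best)) ∧
    (∀ t ∈ ts', ∀ m : Int, -((-lo) / t) ≤ m → m * t ≤ hi → n ≤ fsum times (m * t) →
      ts'.foldl (pvScanT n lo hi times) best ≤ m * t) := by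
  intro ts'
  induction ts' with
  | nil => intro best _; refine ⟨le_rfl, Or.inl rfl, ?_⟩; intro t htm; simp at htm
  | cons t ts' ih =>
    intro best hts
    have ht1 : 1 ≤ t := hts t (by simp)
    have hts' : ∀ u ∈ ts', 1 ≤ u := fun u hu => hts u (by simp [hu])
    simp only [List.foldl_cons]
    -- characterize the inner pass
    have hstep : pvScanT n lo hi times best t ≤ best ∧
        (pvScanT n lo hi times best t = best ∨
          (n ≤ fsum times (pvScanT n lo hi times best t) ∧ lo ≤ pvScanT n lo hi times best t)) ∧
        (∀ m : Int, -((-lo) / t) ≤ m → m * t ≤ hi → n ≤ fsum times (m * t) →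
          pvScanT n lo hi times best t ≤ m * t) := by
      unfold pvScanT
      rw [show PySem.Int.floordiv (-lo) t = (-lo) / t from
        PySem.Int.floordiv_eq_ediv_of_pos (by omega),
        show PySem.Int.floordiv hi t = hi / t from
        PySem.Int.floordiv_eq_ediv_of_pos (by omega)]
      obtain ⟨i1, i2, i3⟩ := scan_inner n t times htimes
        (PySem.List.pyRange (-((-lo) / t)) (hi / t + 1) 1) best
      refine ⟨i1, ?_, ?_⟩
      · rcases i2 with h | ⟨m, hm, hme, hmf⟩
        · exact Or.inl h
        · rw [PySem.List.mem_pyRange_one] at hm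
          refine Or.inr ⟨by rw [hme]; exact hmf, ?_⟩
          rw [hme]
          -- m ≥ ceil(lo / t) implies m * t ≥ lo
          have hc := (ceil_spec lo t (by omega)).1
          nlinarith [hm.1]
      · intro m hm1 hm2 hmf
        apply i3 m _ hmf
        rw [PySem.List.mem_pyRange_one]
        refine ⟨hm1, ?_⟩
        have : m ≤ hi / t := (Int.le_ediv_iff_mul_le (by omega)).2 hm2
        omega
    obtain ⟨s1, s2, s3⟩ := hstep
    obtain ⟨r1, r2, r3⟩ := ih (pvScanT n lo hi times best t) hts'
    refine ⟨by omega, ?_, ?_⟩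
    · rcases r2 with h | h
      · rw [h]
        exact s2
      · exact Or.inr h
    · intro t' ht' m hm1 hm2 hmf
      rcases List.mem_cons.1 ht' with rfl | ht''
      · calc ts'.foldl (pvScanT n lo hi times) (pvScanT n lo hi times best t')
            ≤ pvScanT n lo hi times best t' := r1
          _ ≤ m * t' := s3 m hm1 hm2 hmf
      · exact r3 t' ht'' m hm1 hm2 hmf

-- ===== VERDICT (by name: the statement is the Claim_ definition above) =====
theorem solution_spec : Claim_equal_solution := by
  unfold Claim_equal_solution
  intro n times _ hpre
  obtain ⟨hne, hpos, hneg⟩ := hpre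
  unfold Spec_solution
  -- A's max(times)
  obtain ⟨mx, hmx⟩ : ∃ mx, PySem.List.max? times (fun y => y) = some mx := by
    cases h : PySem.List.max? times (fun y => y) with
    | none => exact absurd ((PySem.List.max?_eq_none_iff times (fun y => y)).1 h) hne
    | some mx => exact ⟨mx, rfl⟩
  have hmem : mx ∈ times := PySem.List.max?_mem hmx
  have hmax : ∀ t ∈ times, t ≤ mx := PySem.List.max?_isMax hmx
  unfold solution
  rw [hmx]
  show pvAloop n times 0 1 (mx * n) = solution_alt n times
  by_cases hn : n ≤ 0
  · -- A's loop never runs (end = mx*n ≤ 0 < 1 = start); B returns 0 directly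
    have hMle : mx * n ≤ 0 := by
      rcases lt_or_eq_of_le hn with hlt | hz
      · obtain ⟨t, htm, ht1⟩ := hneg hlt
        have := hmax t htm
        nlinarith
      · rw [hz]; simp
    rw [pvAloop, dif_neg (by omega)]
    unfold solution_alt
    rw [if_pos hn]
  · push_neg at hn
    have hn1 : 1 ≤ n := hn
    have ht : ∀ t ∈ times, 1 ≤ t := hpos hn
    have hmx1 : 1 ≤ mx := ht mx hmem
    have hM1 : 1 ≤ mx * n := by nlinarith
    -- A's result a* is the least T ≥ 1 with fsum times T ≥ n
    have hfM : n ≤ fsum times (mx * n) := fsum_max times ht mx n hmem hmax hn1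
    have hA := aloop_spec n times ht 0 1 (mx * n) (by omega) (by omega)
      (by intro T h1 h2; omega)
      (le_trans hfM (fsum_mono times ht (by omega)))
      (Or.inr ⟨rfl, hfM, hM1⟩)
    obtain ⟨hA1, hA2, hA3⟩ := hA
    set a := pvAloop n times 0 1 (mx * n) with ha
    -- B's quantities
    set D := pvProd times with hDdef
    have hD1 : 1 ≤ D := pvProd_pos times ht
    have hdvd : ∀ t ∈ times, 1 ≤ t ∧ t ∣ D := fun t htm => ⟨ht t htm, pvProd_dvd times htm⟩
    set S := (times.map (fun t => D / t)).sum with hSdef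
    have hSlen : (times.length : Int) ≤ S := Ssum_ge_length times D hD1 hdvd
    have hlen1 : 1 ≤ (times.length : Int) := by
      cases times with
      | nil => exact absurd rfl hne
      | cons x xs => simp
    have hS1 : 1 ≤ S := by omega
    set k := (times.length : Int) with hkdef
    set lo0 := -((-(n * D)) / S) with hlo0
    set lo := if lo0 < 1 then 1 else lo0 with hlo
    set hi := -((-((n + k) * D)) / S) with hhi
    -- a ≥ lo: a * S ≥ fsum(a) * D ≥ n * D, so a ≥ ceil(n*D/S)
    have hbound1 : n * D ≤ a * S := by
      have h1 : fsum times a * D ≤ a * S := fsum_mul_le times D hD1 hdvd a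
      nlinarith
    have halo0 : lo0 ≤ a := (ceil_spec (n * D) S (by omega)).2 a hbound1
    have halo : lo ≤ a := by rw [hlo]; split_ifs <;> omega
    -- fsum hi ≥ n: hi * S ≥ (n+k) * D and (fsum hi + k) * D ≥ hi * S
    have hhi1 : (n + k) * D ≤ hi * S := (ceil_spec ((n + k) * D) S (by omega)).1
    have hhi2 : hi * S ≤ (fsum times hi + k) * D := fsum_mul_ge times D hD1 hdvd hi
    have hfhi : n ≤ fsum times hi := by nlinarith
    -- hi ≥ 1 and a ≤ hi
    have hhipos : 1 ≤ hi := by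
      by_contra hc
      have := fsum_nonpos times ht (T := hi) (by omega)
      omega
    have hahi : a ≤ hi := by
      by_contra hc
      have := hA3 hi hhipos (by omega)
      omega
    -- a is a multiple of some gate time t*
    have hstrict : fsum times (a - 1) < fsum times a := by
      by_cases hc : a = 1
      · have h0 : fsum times 0 = 0 := by
          unfold fsum
          rw [List.map_congr_left (fun t _ => Int.zero_ediv t)]
          simp
        have h1 : fsum times (a - 1) = 0 := by rw [hc]; simpa using h0
        omega
      · have := hA3 (a - 1) (by omega) (by omega)
        omega
    obtain ⟨tstar, htsm, htslt⟩ := exists_lt_of_fsum_lt times a hstrict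
    have hts1 : 1 ≤ tstar := ht tstar htsm
    have htdvd : tstar ∣ a := dvd_of_ediv_lt a tstar hts1 htslt
    set q := a / tstar with hq
    have hqa : tstar * q = a := Int.mul_ediv_cancel' htdvd
    have hqa' : q * tstar = a := by rw [mul_comm]; exact hqa
    -- q is inside the scanned window for t*
    have hq1 : -((-lo) / tstar) ≤ q := by
      apply (ceil_spec lo tstar (by omega)).2
      nlinarith
    have hq2 : q * tstar ≤ hi := by nlinarith
    -- run B's scan
    obtain ⟨o1, o2, o3⟩ := scan_outer n lo hi times ht times (hi + 1) ht
    set r := times.foldl (pvScanT n lo hi times) (hi + 1) with hr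
    have hra : r ≤ a := by
      have := o3 tstar htsm q hq1 hq2 (by rw [hqa']; exact hA1)
      omega
    have hfr : n ≤ fsum times r ∧ lo ≤ r := by
      rcases o2 with h | h
      · omega
      · exact h
    have hlo1 : 1 ≤ lo := by rw [hlo]; split_ifs with h <;> omega
    have har : a ≤ r := by
      by_contra hc
      have := hA3 r (by omega) (by omega)
      omega
    have hfinal : a = r := by omega
    -- identify B's port value with r
    unfold solution_alt
    rw [if_neg (by omega)]
    simp only [← hDdef]
    rw [show PySem.Int.floordiv (-(n * pvProd times)) (pvSsum (pvProd times) times)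
          = (-(n * D)) / S by
        rw [pvSsum_eq D times ht, ← hSdef, ← hDdef]
        exact PySem.Int.floordiv_eq_ediv_of_pos (by omega),
      show PySem.Int.floordiv (-((n + (times.length : Int)) * pvProd times))
            (pvSsum (pvProd times) times) = (-((n + k) * D)) / S by
        rw [pvSsum_eq D times ht, ← hSdef, ← hDdef, ← hkdef]
        exact PySem.Int.floordiv_eq_ediv_of_pos (by omega)]
    rw [← hlo0, ← hhi, ← hlo]
    exact hfinal
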